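-- pv_equiv track=rewrite | github.com/infectiousoma/ytbridge | src/ytdlp_adapter.py | _looks_like_net_fail
-- ===== SOURCE A (Python) =====
-- def _looks_like_net_fail(stderr: str) -> bool:
--     s = (stderr or "").lower()
--     # match common failure fragments
--     needles = [
--         "timed out", "temporarily unavailable", "temporary failure",
--         "connection refused", "network is unreachable",
--         "cannot assign requested address", "failed to resolve",
--         "tlsv1 alert", "proxy error", "transporterror"
--     ]
--     return any(n in s for n in needles)
-- ===== SOURCE B (Python) =====
-- _NEEDLES = (
--     "timed out", "temporarily unavailable", "temporary failure",
--     "connection refused", "network is unreachable",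
--     "cannot assign requested address", "failed to resolve",
--     "tlsv1 alert", "proxy error", "transporterror",
-- )
--
-- def _looks_like_net_fail(stderr: str) -> bool:
--     # single left-to-right scan: at each position test whether any needle starts there
--     s = (stderr or "").lower()
--     for i in range(len(s)):
--         for n in _NEEDLES:
--             if s.startswith(n, i):
--                 return True
--     return False
-- ===== Notes on version B (the rewrite author's own statement) =====
-- stated objective: alternative
-- what changed: Replaced A's needle-major test (any(n in s) — ten independent substring scans of s) by a single position-major left-to-right scan of the lowered string that at each position checks whether any needle starts there.
import Mathlib
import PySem

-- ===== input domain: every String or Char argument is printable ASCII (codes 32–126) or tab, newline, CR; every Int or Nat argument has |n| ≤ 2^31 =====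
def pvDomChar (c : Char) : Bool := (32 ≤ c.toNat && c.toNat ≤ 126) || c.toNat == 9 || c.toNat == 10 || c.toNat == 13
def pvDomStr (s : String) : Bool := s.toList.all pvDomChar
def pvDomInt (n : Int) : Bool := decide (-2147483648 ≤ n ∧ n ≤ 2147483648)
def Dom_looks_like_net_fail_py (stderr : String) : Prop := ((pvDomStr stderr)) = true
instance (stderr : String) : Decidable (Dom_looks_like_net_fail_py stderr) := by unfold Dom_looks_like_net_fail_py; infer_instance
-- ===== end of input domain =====

-- B replaces the ten independent `n in s` substring scans by ONE left-to-right scan of the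
-- lowered string testing at each position whether any needle starts there (objective: alternative).

-- ===== PORT A =====
-- the needle list of A, in A's order
def netNeedles : List String :=
  ["timed out", "temporarily unavailable", "temporary failure",
   "connection refused", "network is unreachable",
   "cannot assign requested address", "failed to resolve",
   "tlsv1 alert", "proxy error", "transporterror"]

def looks_like_net_fail_py (stderr : String) : Bool :=
  -- s = (stderr or "").lower()
  let s := PySem.Str.lower (if stderr == "" then "" else stderr)
  -- any(n in s for n in needles)
  netNeedles.any (fun n => PySem.Str.isIn n s)

-- ===== PORT B =====
-- Source B's needle tuple, as lists of chars (B works position-wise on characters)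
def netNeedlesB : List (List Char) :=
  ["timed out".toList, "temporarily unavailable".toList, "temporary failure".toList,
   "connection refused".toList, "network is unreachable".toList,
   "cannot assign requested address".toList, "failed to resolve".toList,
   "tlsv1 alert".toList, "proxy error".toList, "transporterror".toList]

-- Source B's position loop: for each suffix (= position i), test `s.startswith(n, i)` for every needle
def netScan (needles : List (List Char)) : List Char → Bool
  | [] => false
  | c :: rest =>
      if needles.any (fun n => n.isPrefixOf (c :: rest)) then true
      else netScan needles rest

def looks_like_net_fail_py_alt (stderr : String) : Bool :=
  let s := PySem.Str.lower (if stderr == "" then "" else stderr)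
  netScan netNeedlesB s.toList

-- ===== PRECONDITION & SPEC =====
def Spec_looks_like_net_fail_py (stderr : String) (out : Bool) : Prop := out = looks_like_net_fail_py_alt stderr
instance (stderr : String) (out : Bool) : Decidable (Spec_looks_like_net_fail_py stderr out) := by unfold Spec_looks_like_net_fail_py; infer_instance

-- ===== CLAIM (what is proved, stated in full; the proofs are below) =====
def Claim_equal_looks_like_net_fail_py : Prop := ∀ (stderr : String), Dom_looks_like_net_fail_py stderr → Spec_looks_like_net_fail_py stderr (looks_like_net_fail_py stderr)

-- ===== LEMMAS AND PROOFS =====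

-- one needle against a cons: `n in c::rest` ↔ n starts there or `n in rest`
theorem isIn_cons_iff (n : List Char) (c : Char) (rest : List Char) :
    PySem.Chars.isIn n (c :: rest) = (n.isPrefixOf (c :: rest) || PySem.Chars.isIn n rest) := by
  rw [Bool.eq_iff_iff]
  simp [PySem.Chars.isIn_iff_infix, List.infix_cons_iff, List.isPrefixOf_iff_prefix]

-- the scan equals the needle-major `any … in …` test, for non-empty needles
theorem netScan_eq (needles : List (List Char)) (h : ∀ n ∈ needles, n ≠ []) :
    ∀ l : List Char, netScan needles l = needles.any (fun n => PySem.Chars.isIn n l) := by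
  intro l
  induction l with
  | nil =>
    simp only [netScan]
    symm
    rw [List.any_eq_false]
    intro n hn
    rw [Bool.not_eq_true, PySem.Chars.isIn_eq_false_iff]
    intro hinf
    exact h n hn (List.eq_nil_of_infix_nil hinf)
  | cons c rest ih =>
    simp only [netScan, ih]
    by_cases hp : needles.any (fun n => n.isPrefixOf (c :: rest)) = true
    · rw [if_pos hp]
      symm
      obtain ⟨n, hn, hpre⟩ := List.any_eq_true.mp hp
      exact List.any_eq_true.mpr ⟨n, hn, by rw [isIn_cons_iff, hpre, Bool.true_or]⟩
    · rw [if_neg hp]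
      rw [Bool.not_eq_true] at hp
      rw [Bool.eq_iff_iff]
      simp only [List.any_eq_true]
      constructor
      · rintro ⟨n, hn, hx⟩
        have hnp : n.isPrefixOf (c :: rest) = false :=
          Bool.eq_false_iff.mpr (List.any_eq_false.mp hp n hn)
        exact ⟨n, hn, by rw [isIn_cons_iff, hnp, Bool.false_or]; exact hx⟩
      · rintro ⟨n, hn, hx⟩
        have hnp : n.isPrefixOf (c :: rest) = false :=
          Bool.eq_false_iff.mpr (List.any_eq_false.mp hp n hn)
        refine ⟨n, hn, ?_⟩
        rw [isIn_cons_iff, hnp, Bool.false_or] at hx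
        exact hx

-- ===== VERDICT (by name: the statement is the Claim_ definition above) =====
theorem looks_like_net_fail_py_spec : Claim_equal_looks_like_net_fail_py := by
  intro stderr _
  unfold Spec_looks_like_net_fail_py looks_like_net_fail_py looks_like_net_fail_py_alt
  rw [netScan_eq netNeedlesB (by decide)]
  simp only [netNeedles, netNeedlesB, List.any_cons, List.any_nil, PySem.Str.isIn_eq]
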